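-- pv_equiv track=rewrite | github.com/josuemj/yalex-yapar-generator | yalex/regex_afd/utils/regex_converter.py | convert_to_regex
-- ===== SOURCE A (Python) =====
-- def convert_to_regex(expr):
--     """Convierte expresiones tipo ['a'-'Z'] o combinaciones a regex simple."""
--
--     # Atajo para 'decimal'
--     if expr == "digito+ punto digito*":
--         return "[0-9]+\\.[0-9]*"  # Uno o más dígitos antes del punto, cero o más después
--
--     expr = expr.replace('[', '').replace(']', '')
--     expr = expr.replace("'", "")
--     expr = expr.replace('"', '\\"')
--
--     if expr.startswith('\\"') and expr.endswith('\\"'):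
--         return '".*?"'
--
--     if len(expr) == 1:
--         return expr
--
--     if '-' in expr and len(expr) > 2:
--         ranges = []
--         i = 0
--         while i < len(expr):
--             if i + 2 < len(expr) and expr[i + 1] == '-':
--                 start_char = expr[i]
--                 end_char = expr[i + 2]
--                 if ord(start_char) > ord(end_char):
--                     raise Exception(f"Rango inválido: {start_char}-{end_char}")
--                 ranges.extend([chr(c) for c in range(ord(start_char), ord(end_char) + 1)])
--                 i += 3
--             else:
--                 ranges.append(expr[i])
--                 i += 1
--         return f"[{''.join(ranges)}]"
--
--     expr = expr.replace('+', '')  # Elimina "+" si no puedes procesarla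
--     expr = expr.replace('?', '')
--     expr = expr.replace('*', '')
--
--     return expr
-- ===== SOURCE B (Python) =====
-- import re
--
--
-- def convert_to_regex(expr):
--     """Same conversion, but the hand-written range-expansion scan is replaced
--     by a single regex-driven re.sub pass over the same spans."""
--
--     if expr == "digito+ punto digito*":
--         return "[0-9]+\\.[0-9]*"
--
--     expr = expr.replace('[', '').replace(']', '')
--     expr = expr.replace("'", "")
--     expr = expr.replace('"', '\\"')
--
--     if expr.startswith('\\"') and expr.endswith('\\"'):
--         return '".*?"'
--
--     if len(expr) == 1:
--         return expr
--
--     if '-' in expr and len(expr) > 2: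
--         def repl(m):
--             a, b = m.group(1), m.group(2)
--             if ord(a) > ord(b):
--                 raise Exception(f"Rango inválido: {a}-{b}")
--             return ''.join(chr(c) for c in range(ord(a), ord(b) + 1))
--         return "[" + re.sub(r'(.)-(.)', repl, expr, flags=re.DOTALL) + "]"
--
--     return expr.replace('+', '').replace('?', '').replace('*', '')
-- ===== Notes on version B (the rewrite author's own statement) =====
-- stated objective: idiomatic
-- what changed: The hand-written index-stepping while-loop that expands character ranges is replaced by a single re.sub(r'(.)-(.)', repl, expr, flags=re.DOTALL) pass whose callback expands (or rejects) each matched span; all surrounding guards and replace-chains are kept byte-for-byte.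
-- outside the precondition, e.g. on convert_to_regex('a-b-a'): A returns '[ab-a]', B returns '[ab-a]'
import Mathlib
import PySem

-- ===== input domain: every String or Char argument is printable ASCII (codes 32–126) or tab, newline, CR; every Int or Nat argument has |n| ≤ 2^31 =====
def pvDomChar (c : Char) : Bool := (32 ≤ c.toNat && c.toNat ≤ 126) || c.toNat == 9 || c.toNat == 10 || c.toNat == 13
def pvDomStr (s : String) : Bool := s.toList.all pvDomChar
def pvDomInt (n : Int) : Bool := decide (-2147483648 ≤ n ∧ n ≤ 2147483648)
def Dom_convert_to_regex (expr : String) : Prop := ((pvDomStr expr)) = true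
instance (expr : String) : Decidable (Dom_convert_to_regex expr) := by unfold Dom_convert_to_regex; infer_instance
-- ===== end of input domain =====

-- B replaces A's hand-written index-stepping range-expansion loop by a regex-driven
-- (re.sub "(.)-(.)" with DOTALL) greedy left-to-right pass; same value everywhere on Pre_.


-- the replace-chain both programs (and Pre_) perform on the raw input, shared verbatim
def pvStrip (cs : List Char) : List Char :=
  PySem.Chars.replace
    (PySem.Chars.replace
      (PySem.Chars.replace (PySem.Chars.replace cs ['['] []) [']'] [])
      ['\''] [])
    ['\"'] ['\\', '\"']

-- ===== PORT A =====
-- [chr(c) for c in range(ord(start_char), ord(end_char) + 1)]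
def pvARange (a b : Char) : List Char :=
  (PySem.List.pyRange (a.toNat : Int) ((b.toNat : Int) + 1) 1).map (fun c => Char.ofNat c.toNat)

-- A's while-loop: index i stepping by 3 or 1 over the full list, appending to `ranges`;
-- `none` is exactly Python's `raise Exception(...)`.
def pvALoop (s : List Char) (i : Nat) (acc : List Char) : Option (List Char) :=
  if _h : i < s.length then
    if i + 2 < s.length ∧ s[i + 1]! = '-' then
      if s[i]!.toNat > s[i + 2]!.toNat then none
      else pvALoop s (i + 3) (acc ++ pvARange s[i]! s[i + 2]!)
    else pvALoop s (i + 1) (acc ++ [s[i]!])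
  else some acc
termination_by s.length - i

def convert_to_regex (expr : String) : String :=
  if expr = "digito+ punto digito*" then "[0-9]+\\.[0-9]*"
  else
    let e := pvStrip expr.toList
    if PySem.Chars.startswith e ['\\', '\"'] && PySem.Chars.endswith e ['\\', '\"'] then "\".*?\""
    else if e.length = 1 then String.ofList e
    else if PySem.Chars.isIn ['-'] e && decide (2 < e.length) then
      match pvALoop e 0 [] with
      | some r => String.ofList ('[' :: (r ++ [']']))
      | none => ""   -- unreachable inside Pre_ (Python raises here)
    else
      String.ofList (PySem.Chars.replace (PySem.Chars.replace (PySem.Chars.replace e ['+'] []) ['?'] []) ['*'] [])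

-- ===== PORT B =====
-- repl's ''.join(chr(c) for c in range(ord(a), ord(b)+1))
def pvBRange (a b : Char) : List Char :=
  (List.range' a.toNat (b.toNat + 1 - a.toNat)).map Char.ofNat

-- re.sub(r'(.)-(.)', repl, expr, flags=re.DOTALL): greedy non-overlapping left-to-right
-- scan; a span a-b (three chars, middle '-') is replaced by repl, otherwise one char is
-- copied; `none` is exactly repl's `raise Exception(...)`.
def pvBSub : List Char → Option (List Char)
  | a :: d :: b :: rest =>
      if d = '-' then
        if a.toNat > b.toNat then none
        else (pvBSub rest).map (fun t => pvBRange a b ++ t)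
      else (pvBSub (d :: b :: rest)).map (fun t => a :: t)
  | a :: rest => (pvBSub rest).map (fun t => a :: t)
  | [] => some []

def convert_to_regex_alt (expr : String) : String :=
  if expr = "digito+ punto digito*" then "[0-9]+\\.[0-9]*"
  else
    let e := pvStrip expr.toList
    if PySem.Chars.startswith e ['\\', '\"'] && PySem.Chars.endswith e ['\\', '\"'] then "\".*?\""
    else if e.length = 1 then String.ofList e
    else if PySem.Chars.isIn ['-'] e && decide (2 < e.length) then
      match pvBSub e with
      | some r => String.ofList ('[' :: (r ++ [']']))
      | none => ""   -- unreachable inside Pre_ (Python raises here)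
    else
      String.ofList (PySem.Chars.replace (PySem.Chars.replace (PySem.Chars.replace e ['+'] []) ['?'] []) ['*'] [])

-- ===== PRECONDITION & SPEC =====
-- Pre_ excludes inputs whose stripped form contains a descending pair c-d followed by at
-- least one more character: on those the range branch of both programs raises Exception
-- ("Rango inválido"); the closed form also drops rare inputs (e.g. "a-b-a") where the
-- descending pair is masked by an earlier match and both programs still return the SAME value.
def Pre_convert_to_regex (expr : String) : Prop :=
  expr = "digito+ punto digito*" ∨
  (PySem.Chars.startswith (pvStrip expr.toList) ['\\', '\"'] = true ∧
   PySem.Chars.endswith (pvStrip expr.toList) ['\\', '\"'] = true) ∨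
  (pvStrip expr.toList).length = 1 ∨
  ¬(PySem.Chars.isIn ['-'] (pvStrip expr.toList) = true ∧ 2 < (pvStrip expr.toList).length) ∨
  (∀ i < (pvStrip expr.toList).length, i + 2 < (pvStrip expr.toList).length →
      (pvStrip expr.toList)[i + 1]! = '-' →
      (pvStrip expr.toList)[i]!.toNat ≤ (pvStrip expr.toList)[i + 2]!.toNat)
instance (expr : String) : Decidable (Pre_convert_to_regex expr) := by
  unfold Pre_convert_to_regex; infer_instance

def pvWitness_convert_to_regex : String := "['a'-'c']"

def Spec_convert_to_regex (expr : String) (out : String) : Prop := out = convert_to_regex_alt expr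
instance (expr : String) (out : String) : Decidable (Spec_convert_to_regex expr out) := by unfold Spec_convert_to_regex; infer_instance

-- ===== CLAIM (what is proved, stated in full; the proofs are below) =====
def Claim_equal_convert_to_regex : Prop := ∀ (expr : String), Dom_convert_to_regex expr → Pre_convert_to_regex expr → Spec_convert_to_regex expr (convert_to_regex expr)

-- ===== LEMMAS AND PROOFS =====

lemma pvRange_eq (a b : Char) : pvARange a b = pvBRange a b := by
  unfold pvARange pvBRange
  rw [PySem.List.pyRange_one, List.range'_eq_map_range, List.map_map, List.map_map]
  have hn : (((b.toNat:Int)+1) - (a.toNat:Int)).toNat = b.toNat + 1 - a.toNat := by omega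
  rw [hn]
  apply List.map_congr_left
  intro k hk
  show Char.ofNat ((a.toNat : Int) + (k : Int)).toNat = Char.ofNat (a.toNat + k)
  congr 1

lemma pvBSub_cons (a : Char) (t : List Char) (h : 2 ≤ t.length → t[0]! ≠ '-') :
    pvBSub (a :: t) = (pvBSub t).map (fun r => a :: r) := by
  match t with
  | [] => simp [pvBSub]
  | [d] => simp [pvBSub]
  | d :: b :: rest =>
    have hd : d ≠ '-' := by simpa using h (by simp)
    simp [pvBSub, hd]

lemma pvALoop_eq (s : List Char)
    (good : ∀ i, i + 2 < s.length → s[i + 1]! = '-' → s[i]!.toNat ≤ s[i + 2]!.toNat) :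
    ∀ n i acc, s.length - i ≤ n →
      pvALoop s i acc = (pvBSub (s.drop i)).map (fun r => acc ++ r) := by
  intro n
  induction n with
  | zero =>
    intro i acc hn
    have hi : s.length ≤ i := by omega
    rw [pvALoop, dif_neg (by omega)]
    rw [List.drop_eq_nil_of_le hi]
    simp [pvBSub]
  | succ n ih =>
    intro i acc hn
    by_cases hi : i < s.length
    · have hdi : s.drop i = s[i]! :: s.drop (i + 1) := by
        rw [getElem!_pos s i hi, List.getElem_cons_drop]
      rw [pvALoop, dif_pos hi]
      by_cases hc : i + 2 < s.length ∧ s[i + 1]! = '-'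
      · obtain ⟨hc1, hc2⟩ := hc
        have hi1 : i + 1 < s.length := by omega
        have hd1 : s.drop (i + 1) = s[i+1]! :: s.drop (i + 2) := by
          rw [getElem!_pos s (i+1) hi1, List.getElem_cons_drop]
        have hd2 : s.drop (i + 2) = s[i+2]! :: s.drop (i + 3) := by
          rw [getElem!_pos s (i+2) hc1, List.getElem_cons_drop]
        have hle := good i hc1 hc2
        rw [if_pos ⟨hc1, hc2⟩, if_neg (by omega)]
        rw [ih (i + 3) (acc ++ pvARange s[i]! s[i+2]!) (by omega)]
        rw [hdi, hd1, hd2, hc2]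
        simp only [pvBSub, if_neg (by omega : ¬ s[i]!.toNat > s[i+2]!.toNat)]
        rw [if_pos trivial, Option.map_map]
        have hfe : ((fun r => acc ++ r) ∘ fun t => pvBRange s[i]! s[i+2]! ++ t)
            = fun r => acc ++ pvARange s[i]! s[i+2]! ++ r := by
          funext r; simp [pvRange_eq, Function.comp, List.append_assoc]
        rw [hfe]
      · rw [if_neg hc]
        rw [ih (i + 1) (acc ++ [s[i]!]) (by omega)]
        rw [hdi, pvBSub_cons]
        · rw [Option.map_map]
          have hfe : ((fun r => acc ++ r) ∘ fun r => s[i]! :: r)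
              = fun r => acc ++ [s[i]!] ++ r := by
            funext r; simp [Function.comp]
          rw [hfe]
        · intro h2 
          have hi2 : i + 2 < s.length := by
            simp [List.length_drop] at h2
            omega
          have h0 : (s.drop (i+1))[0]! = s[i+1]! := by
            have h01 : 0 < (s.drop (i+1)).length := by simp [List.length_drop]; omega
            rw [getElem!_pos _ 0 h01, List.getElem_drop, getElem!_pos s (i+1) (by omega)]
          rw [h0]
          intro hmin
          exact hc ⟨hi2, hmin⟩
    · rw [pvALoop, dif_neg hi]
      rw [List.drop_eq_nil_of_le (by omega)]
      simp [pvBSub]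

lemma pvLoops_eq (e : List Char)
    (good : ∀ i, i + 2 < e.length → e[i + 1]! = '-' → e[i]!.toNat ≤ e[i + 2]!.toNat) :
    pvALoop e 0 [] = pvBSub e := by
  rw [pvALoop_eq e good e.length 0 [] (by omega)]
  simp

-- ===== VERDICT (by name: the statement is the Claim_ definition above) =====
theorem convert_to_regex_spec : Claim_equal_convert_to_regex := by
  intro expr _ hpre
  unfold Spec_convert_to_regex convert_to_regex convert_to_regex_alt
  by_cases h1 : expr = "digito+ punto digito*"
  · rw [if_pos h1, if_pos h1]
  rw [if_neg h1, if_neg h1]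
  by_cases h2 : (PySem.Chars.startswith (pvStrip expr.toList) ['\\', '\"'] &&
      PySem.Chars.endswith (pvStrip expr.toList) ['\\', '\"']) = true
  · rw [if_pos h2, if_pos h2]
  rw [if_neg h2, if_neg h2]
  by_cases h3 : (pvStrip expr.toList).length = 1
  · rw [if_pos h3, if_pos h3]
  rw [if_neg h3, if_neg h3]
  by_cases h4 : (PySem.Chars.isIn ['-'] (pvStrip expr.toList) &&
      decide (2 < (pvStrip expr.toList).length)) = true
  · rw [if_pos h4, if_pos h4]
    have good : ∀ i, i + 2 < (pvStrip expr.toList).length →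
        (pvStrip expr.toList)[i + 1]! = '-' →
        (pvStrip expr.toList)[i]!.toNat ≤ (pvStrip expr.toList)[i + 2]!.toNat := by
      rcases hpre with h | h | h | h | h
      · exact absurd h h1
      · exact absurd (by rw [h.1, h.2]; rfl) h2
      · exact absurd h h3
      · rw [Bool.and_eq_true, decide_eq_true_iff] at h4
        exact absurd ⟨h4.1, h4.2⟩ h
      · exact fun i hi hm => h i (by omega) hi hm
    rw [pvLoops_eq (pvStrip expr.toList) good]
  rw [if_neg h4, if_neg h4]
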